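-- pv_equiv track=rewrite | github.com/harlan0103/ChillCloud | back-end/app.py | base36_encode
-- ===== SOURCE A (Python) =====
-- def base36_encode(number):
--     assert number >= 0, 'positive integer required'
--     if number == 0:
--         return '0'
--     base36 = []
--     while number != 0:
--         number, i = divmod(number, 36)
--         base36.append('0123456789abcdefghijklmnopqrstuvwxyz'[i])
--     return ''.join(reversed(base36))
-- ===== SOURCE B (Python) =====
-- def base36_encode(number):
--     assert number >= 0, 'positive integer required'
--     alphabet = '0123456789abcdefghijklmnopqrstuvwxyz'
--     p = 1
--     while p * 36 <= number:
--         p *= 36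
--     out = ''
--     while p > 0:
--         out += alphabet[number // p]
--         number %= p
--         p //= 36
--     return out
-- ===== Notes on version B (the rewrite author's own statement) =====
-- stated objective: alternative
-- what changed: Replaced the append-least-significant-digit-then-reverse loop by two different loops: first find the largest base power not exceeding the number, then emit digits most-significant-first by division by that shrinking power; no digit list, no reversal, and no special-cased base case.
import Mathlib
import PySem

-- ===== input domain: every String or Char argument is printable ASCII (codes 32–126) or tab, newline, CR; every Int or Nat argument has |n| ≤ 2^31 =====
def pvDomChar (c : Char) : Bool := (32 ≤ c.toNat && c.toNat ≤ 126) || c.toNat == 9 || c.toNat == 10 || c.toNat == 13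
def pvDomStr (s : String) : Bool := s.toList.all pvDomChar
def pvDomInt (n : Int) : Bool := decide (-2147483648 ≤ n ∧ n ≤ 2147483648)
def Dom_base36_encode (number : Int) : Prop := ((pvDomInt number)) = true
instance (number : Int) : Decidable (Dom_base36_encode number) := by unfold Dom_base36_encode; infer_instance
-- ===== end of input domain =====

-- B replaces A's append-then-reverse digit loop by a two-phase most-significant-first extraction using the largest base power (alternative decomposition, same cost).


-- ===== PORT A =====
-- '0123456789abcdefghijklmnopqrstuvwxyz'[i] for 0 ≤ i < 36 (both programs guarantee the range)
def pvDigit (i : Nat) : Char :=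
  "0123456789abcdefghijklmnopqrstuvwxyz".toList.getD i ' '

-- the while loop of A: number, i = divmod(number, 36); base36.append(digit)
-- (the assert guarantees number ≥ 0, so Int divmod agrees with Nat div/mod; recursion on the Nat value)
def pvLoopA (n : Nat) (acc : List Char) : List Char :=
  if h : n = 0 then acc
  else pvLoopA (n / 36) (acc ++ [pvDigit (n % 36)])
  decreasing_by exact Nat.div_lt_self (Nat.pos_of_ne_zero h) (by norm_num)

def base36_encode (number : Int) : String :=
  if number = 0 then "0"
  else String.mk (List.reverse (pvLoopA number.toNat []))

-- ===== PORT B =====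
-- first while loop of B: p = 1; while p * 36 <= number: p *= 36
-- (the '0 < p' conjunct is a totality guard only; B always starts from p = 1 and p stays positive)
def pvPowLoop (n p : Nat) : Nat :=
  if h : 0 < p ∧ p * 36 ≤ n then pvPowLoop n (p * 36) else p
  termination_by n + 1 - p
  decreasing_by omega

-- second while loop of B: while p > 0: out += alphabet[number // p]; number %= p; p //= 36
def pvEmit (n p : Nat) : List Char :=
  if h : 0 < p then pvDigit (n / p) :: pvEmit (n % p) (p / 36) else []
  termination_by p
  decreasing_by exact Nat.div_lt_self h (by norm_num)

def base36_encode_alt (number : Int) : String :=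
  String.mk (pvEmit number.toNat (pvPowLoop number.toNat 1))

-- ===== PRECONDITION & SPEC =====
-- Pre_ excludes negative inputs, where A (and B) raise AssertionError.
def Pre_base36_encode (number : Int) : Prop := 0 ≤ number
instance (number : Int) : Decidable (Pre_base36_encode number) := by unfold Pre_base36_encode; infer_instance
def pvWitness_base36_encode : Int := 42

def Spec_base36_encode (number : Int) (out : String) : Prop := out = base36_encode_alt number
instance (number : Int) (out : String) : Decidable (Spec_base36_encode number out) := by unfold Spec_base36_encode; infer_instance

-- ===== CLAIM (what is proved, stated in full; the proofs are below) =====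
def Claim_equal_base36_encode : Prop := ∀ (number : Int), Dom_base36_encode number → Pre_base36_encode number → Spec_base36_encode number (base36_encode number)

-- ===== LEMMAS AND PROOFS =====
-- proof-side spec: the most-significant-first digit list, empty at 0
def pvMSD (n : Nat) : List Char :=
  if h : n = 0 then [] else pvMSD (n / 36) ++ [pvDigit (n % 36)]
  decreasing_by exact Nat.div_lt_self (Nat.pos_of_ne_zero h) (by norm_num)

theorem pvLoopA_reverse (n : Nat) : ∀ acc, (pvLoopA n acc).reverse = pvMSD n ++ acc.reverse := by
  induction n using Nat.strong_induction_on with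
  | _ n ih =>
    intro acc
    by_cases h : n = 0
    · simp [pvLoopA, pvMSD, h]
    · rw [pvLoopA, pvMSD, dif_neg h, dif_neg h,
        ih (n / 36) (Nat.div_lt_self (Nat.pos_of_ne_zero h) (by norm_num))]
      simp

theorem pvPowLoop_spec : ∀ (k n p : Nat), n + 1 - p ≤ k → 0 < p → p ≤ n →
    ∃ j, pvPowLoop n p = p * 36 ^ j ∧ pvPowLoop n p ≤ n ∧ n < pvPowLoop n p * 36 := by
  intro k
  induction k with
  | zero => intro n p hk hp hle; omega
  | succ k ih =>
    intro n p hk hp hle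
    by_cases h : p * 36 ≤ n
    · rw [pvPowLoop, dif_pos ⟨hp, h⟩]
      obtain ⟨j, hj⟩ := ih n (p * 36) (by omega) (by omega) h
      exact ⟨j + 1, by rw [hj.1]; ring, hj.2.1, hj.2.2⟩
    · rw [pvPowLoop, dif_neg (by tauto)]
      exact ⟨0, by ring, hle, by omega⟩

theorem pvEmit_swap : ∀ j n, pvEmit n (36 ^ (j + 1)) = pvEmit (n / 36) (36 ^ j) ++ [pvDigit (n % 36)] := by
  intro j
  induction j with
  | zero =>
    intro n
    simp [pvEmit]
  | succ j ih =>
    intro n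
    rw [pvEmit, dif_pos (pow_pos (by norm_num) _)]
    conv_rhs => rw [pvEmit, dif_pos (pow_pos (by norm_num) _)]
    have e1 : 36 ^ (j + 1 + 1) / 36 = 36 ^ (j + 1) := by
      rw [pow_succ, Nat.mul_div_cancel]; norm_num
    have e2 : 36 ^ (j + 1) / 36 = 36 ^ j := by
      rw [pow_succ, Nat.mul_div_cancel]; norm_num
    rw [e1, e2, ih (n % 36 ^ (j + 1 + 1))]
    have h1 : n / 36 ^ (j + 1 + 1) = n / 36 / 36 ^ (j + 1) := by
      rw [Nat.div_div_eq_div_mul, ← pow_succ']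
    have h2 : n % 36 ^ (j + 1 + 1) / 36 = n / 36 % 36 ^ (j + 1) := by
      have : (36 : Nat) ^ (j + 1 + 1) = 36 * 36 ^ (j + 1) := by rw [pow_succ']
      rw [this, Nat.mod_mul_right_div_self]
    have h3 : n % 36 ^ (j + 1 + 1) % 36 = n % 36 :=
      Nat.mod_mod_of_dvd n (dvd_pow_self 36 (by omega))
    rw [h1, h2, h3]
    simp

theorem pvEmit_eq_msd : ∀ j n, 36 ^ j ≤ n → n < 36 ^ (j + 1) → pvEmit n (36 ^ j) = pvMSD n := by
  intro j
  induction j with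
  | zero =>
    intro n h1 h2
    rw [pow_zero] at h1
    rw [zero_add, pow_one] at h2
    conv_rhs => rw [pvMSD, dif_neg (by omega : ¬ n = 0),
      pvMSD, dif_pos (Nat.div_eq_of_lt h2)]
    simp [pvEmit, Nat.mod_eq_of_lt h2]
  | succ j ih =>
    intro n h1 h2
    have hd1 : 36 ^ j ≤ n / 36 := by
      rw [Nat.le_div_iff_mul_le (by norm_num), ← pow_succ]; exact h1
    have hd2 : n / 36 < 36 ^ (j + 1) := by
      rw [Nat.div_lt_iff_lt_mul (by norm_num), ← pow_succ]; exact h2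
    have hn : n ≠ 0 := by
      have : 0 < 36 ^ (j + 1) := pow_pos (by norm_num) _
      omega
    rw [pvEmit_swap, ih _ hd1 hd2]
    conv_rhs => rw [pvMSD, dif_neg hn]

-- ===== VERDICT (by name: the statement is the Claim_ definition above) =====
theorem base36_encode_spec : Claim_equal_base36_encode := by
  intro number _ hpre
  simp only [Pre_base36_encode] at hpre
  unfold Spec_base36_encode base36_encode base36_encode_alt
  by_cases h : number = 0
  · subst h
    rw [show ((0 : Int).toNat) = 0 from rfl]
    rw [pvPowLoop, dif_neg (by norm_num)]
    simp [pvEmit, pvDigit]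
    rfl
  · have hn : 0 < number.toNat := by omega
    obtain ⟨j, hj, hle, hlt⟩ := pvPowLoop_spec (number.toNat + 1) number.toNat 1 (by omega) (by norm_num) hn
    rw [hj] at hle hlt
    simp only [one_mul] at hj hle hlt
    rw [if_neg h, hj]
    rw [pvEmit_eq_msd j _ hle (by rw [pow_succ]; exact hlt)]
    have := pvLoopA_reverse number.toNat []
    simp at this
    rw [this]
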